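-- pv_equiv track=rewrite | github.com/jonny-jhnson/EventSight | Eventsight/src/eventsight/agent.py | _techniques_compatible
-- ===== SOURCE A (Python) =====
-- def _techniques_compatible(tech1: str, tech2: str) -> bool:
--     """
--     Check if two MITRE techniques are compatible for merging.
--
--     Techniques are compatible if they:
--     1. Are exactly the same
--     2. Share the same parent technique (e.g., T1555.004 and T1552.004 both relate to credentials)
--     3. Are in the same technique family group
--     """
--     if tech1 == tech2:
--         return True
--
--     # Both unknown
--     if tech1 == "unknown" and tech2 == "unknown":
--         return True
--
--     # One unknown, one known - don't merge
--     if tech1 == "unknown" or tech2 == "unknown":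
--         return False
--
--     # Get base technique (e.g., T1555.004 -> T1555)
--     base1 = tech1.split(".")[0] if "." in tech1 else tech1
--     base2 = tech2.split(".")[0] if "." in tech2 else tech2
--
--     # Same base technique family (e.g., T1555.001 and T1555.004)
--     if base1 == base2:
--         return True
--
--     # Define technique families that should be merged together
--     # These are techniques that often describe the same underlying activity
--     technique_families = [
--         # Credential access techniques
--         {"T1552", "T1555", "T1003"},  # Unsecured Credentials, Credentials from Password Stores, OS Credential Dumping
--         # Discovery/enumeration techniques
--         {"T1083", "T1135", "T1082"},  # File Discovery, Network Share Discovery, System Info Discovery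
--         # Lateral movement techniques
--         {"T1021", "T1570"},  # Remote Services, Lateral Tool Transfer
--         # C2/network/masquerading - often describe same suspicious exe activity
--         {"T1071", "T1036", "T1105"},  # App Layer Protocol, Masquerading, Ingress Tool Transfer
--         # Process injection variants
--         {"T1055", "T1059"},  # Process Injection, Command and Scripting Interpreter
--     ]
--
--     for family in technique_families:
--         if base1 in family and base2 in family:
--             return True
--
--     return False
-- ===== SOURCE B (Python) =====
-- # B: normalize-then-compare. Each technique is mapped to a canonical form (its
-- # family representative, or its base code if it belongs to no family); two
-- # techniques are compatible iff they are literally equal, or neither is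
-- # "unknown" and their canonical forms coincide. This collapses A's base1==base2
-- # branch and family-set scan into one canonicalization + equality test.
-- _REP = {
--     "T1552": "T1552", "T1555": "T1552", "T1003": "T1552",
--     "T1083": "T1083", "T1135": "T1083", "T1082": "T1083",
--     "T1021": "T1021", "T1570": "T1021",
--     "T1071": "T1071", "T1036": "T1071", "T1105": "T1071",
--     "T1055": "T1055", "T1059": "T1055",
-- }
--
-- def _canonical(tech: str) -> str:
--     base = tech.split(".")[0] if "." in tech else tech
--     return _REP.get(base, base)
--
-- def _techniques_compatible(tech1: str, tech2: str) -> bool: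
--     if tech1 == tech2:
--         return True
--     if tech1 == "unknown" or tech2 == "unknown":
--         return False
--     return _canonical(tech1) == _canonical(tech2)
-- ===== Notes on version B (the rewrite author's own statement) =====
-- stated objective: simpler
-- what changed: B is a normalize-then-compare: each technique is mapped once to a canonical family representative and compared for equality, replacing A's both-unknown guard, base1==base2 branch and per-call scan over five family sets.
import Mathlib
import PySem

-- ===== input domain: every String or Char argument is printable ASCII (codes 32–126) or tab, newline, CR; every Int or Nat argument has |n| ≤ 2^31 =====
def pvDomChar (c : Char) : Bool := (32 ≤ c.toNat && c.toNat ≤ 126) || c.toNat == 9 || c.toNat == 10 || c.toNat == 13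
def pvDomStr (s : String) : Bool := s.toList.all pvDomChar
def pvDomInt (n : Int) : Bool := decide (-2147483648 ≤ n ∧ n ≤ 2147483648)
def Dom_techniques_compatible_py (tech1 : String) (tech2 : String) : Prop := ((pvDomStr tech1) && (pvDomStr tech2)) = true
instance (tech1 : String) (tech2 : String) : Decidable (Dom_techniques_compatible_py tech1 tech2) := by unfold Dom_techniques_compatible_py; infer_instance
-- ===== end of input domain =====

-- B replaces A's family-set scan and extra branches with a normalize-then-compare: each technique is canonicalized to a family representative once and the canonical forms are compared (simpler control flow; return-value equivalence proved).


-- ===== PORT A =====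
-- shared base-extraction: tech.split(".")[0] if "." in tech else tech
-- (split? with sep "." ≠ "" is always some nonempty list, so the getD/headD defaults are unreachable)
def pvBase (tech : String) : String :=
  if PySem.Str.isIn "." tech then ((PySem.Str.split? tech ".").getD []).headD "" else tech

def pvFamilies : List (PySem.Set String) :=
  [PySem.Set.ofList ["T1552", "T1555", "T1003"],
   PySem.Set.ofList ["T1083", "T1135", "T1082"],
   PySem.Set.ofList ["T1021", "T1570"],
   PySem.Set.ofList ["T1071", "T1036", "T1105"],
   PySem.Set.ofList ["T1055", "T1059"]]

def pvFamLoop (base1 base2 : String) : List (PySem.Set String) → Bool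
  | [] => false
  | fam :: rest =>
      if PySem.Set.contains fam base1 && PySem.Set.contains fam base2 then true
      else pvFamLoop base1 base2 rest

def techniques_compatible_py (tech1 : String) (tech2 : String) : Bool :=
  if tech1 == tech2 then true
  else if tech1 == "unknown" && tech2 == "unknown" then true
  else if tech1 == "unknown" || tech2 == "unknown" then false
  else
    let base1 := pvBase tech1
    let base2 := pvBase tech2
    if base1 == base2 then true
    else pvFamLoop base1 base2 pvFamilies

-- ===== PORT B =====
def pvRep : PySem.Dict String String := PySem.Dict.mk
  [("T1552", "T1552"), ("T1555", "T1552"), ("T1003", "T1552"),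
   ("T1083", "T1083"), ("T1135", "T1083"), ("T1082", "T1083"),
   ("T1021", "T1021"), ("T1570", "T1021"),
   ("T1071", "T1071"), ("T1036", "T1071"), ("T1105", "T1071"),
   ("T1055", "T1055"), ("T1059", "T1055")]

def pvCanonical (tech : String) : String :=
  let base := pvBase tech
  PySem.Dict.getD pvRep base base

def techniques_compatible_py_alt (tech1 : String) (tech2 : String) : Bool :=
  if tech1 == tech2 then true
  else if tech1 == "unknown" || tech2 == "unknown" then false
  else pvCanonical tech1 == pvCanonical tech2

-- ===== PRECONDITION & SPEC =====
def Spec_techniques_compatible_py (tech1 : String) (tech2 : String) (out : Bool) : Prop := out = techniques_compatible_py_alt tech1 tech2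
instance (tech1 : String) (tech2 : String) (out : Bool) : Decidable (Spec_techniques_compatible_py tech1 tech2 out) := by unfold Spec_techniques_compatible_py; infer_instance

-- ===== CLAIM (what is proved, stated in full; the proofs are below) =====
def Claim_equal_techniques_compatible_py : Prop := ∀ (tech1 : String) (tech2 : String), Dom_techniques_compatible_py tech1 tech2 → Spec_techniques_compatible_py tech1 tech2 (techniques_compatible_py tech1 tech2)

-- ===== LEMMAS AND PROOFS =====
def pvCodes : List String :=
  ["T1552", "T1555", "T1003", "T1083", "T1135", "T1082", "T1021", "T1570",
   "T1071", "T1036", "T1105", "T1055", "T1059"]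

-- A's post-guard result (same-base test, then the family scan) coincides with
-- equality of the canonical representatives.
theorem pvKey (b1 b2 : String) :
    (if b1 == b2 then true else pvFamLoop b1 b2 pvFamilies) =
      (PySem.Dict.getD pvRep b1 b1 == PySem.Dict.getD pvRep b2 b2) := by
  by_cases h1 : b1 ∈ pvCodes
  · by_cases h2 : b2 ∈ pvCodes
    · fin_cases h1 <;> fin_cases h2 <;> decide
    · -- b2 outside every family: scan fails unless b1 = b2, and rep b2 = b2 is
      -- not a representative matching rep b1 (reps are codes, b2 is not).
      simp only [pvCodes, List.mem_cons, List.not_mem_nil, or_false, not_or] at h2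
      obtain ⟨n1, n2, n3, n4, n5, n6, n7, n8, n9, n10, n11, n12, n13⟩ := h2
      have m1 := Ne.symm n1; have m2 := Ne.symm n2; have m3 := Ne.symm n3
      have m4 := Ne.symm n4; have m5 := Ne.symm n5; have m6 := Ne.symm n6
      have m7 := Ne.symm n7; have m8 := Ne.symm n8; have m9 := Ne.symm n9
      have m10 := Ne.symm n10; have m11 := Ne.symm n11; have m12 := Ne.symm n12
      have m13 := Ne.symm n13
      fin_cases h1 <;>
        simp [pvFamLoop, pvFamilies, pvRep, PySem.Set.contains,
          PySem.Dict.getD, PySem.Dict.get?, n1, n2, n3, n4, n5, n6, n7, n8,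
          n9, n10, n11, n12, n13, m1, m2, m3, m4, m5, m6, m7, m8, m9, m10, m11,
          m12, m13]
  · simp only [pvCodes, List.mem_cons, List.not_mem_nil, or_false, not_or] at h1
    obtain ⟨n1, n2, n3, n4, n5, n6, n7, n8, n9, n10, n11, n12, n13⟩ := h1
    have m1 := Ne.symm n1; have m2 := Ne.symm n2; have m3 := Ne.symm n3
    have m4 := Ne.symm n4; have m5 := Ne.symm n5; have m6 := Ne.symm n6
    have m7 := Ne.symm n7; have m8 := Ne.symm n8; have m9 := Ne.symm n9
    have m10 := Ne.symm n10; have m11 := Ne.symm n11; have m12 := Ne.symm n12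
    have m13 := Ne.symm n13
    by_cases hb : b1 = b2
    · subst hb
      simp [pvFamLoop, pvFamilies, pvRep, PySem.Set.contains,
        PySem.Dict.getD, PySem.Dict.get?, n1, n2, n3, n4, n5, n6, n7, n8,
        n9, n10, n11, n12, n13]
    · by_cases h2 : b2 ∈ pvCodes
      · fin_cases h2 <;>
          simp_all [pvFamLoop, pvFamilies, pvRep, PySem.Set.contains,
            PySem.Dict.getD, PySem.Dict.get?]
      · simp only [pvCodes, List.mem_cons, List.not_mem_nil, or_false, not_or] at h2
        obtain ⟨k1, k2, k3, k4, k5, k6, k7, k8, k9, k10, k11, k12, k13⟩ := h2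
        have l1 := Ne.symm k1; have l2 := Ne.symm k2; have l3 := Ne.symm k3
        have l4 := Ne.symm k4; have l5 := Ne.symm k5; have l6 := Ne.symm k6
        have l7 := Ne.symm k7; have l8 := Ne.symm k8; have l9 := Ne.symm k9
        have l10 := Ne.symm k10; have l11 := Ne.symm k11; have l12 := Ne.symm k12
        have l13 := Ne.symm k13
        simp [pvFamLoop, pvFamilies, pvRep, PySem.Set.contains,
          PySem.Dict.getD, PySem.Dict.get?, n1, n2, n3, n4, n5, n6, n7, n8,
          n9, n10, n11, n12, n13, m1, m2, m3, m4, m5, m6, m7, m8,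
          m9, m10, m11, m12, m13, k1, k2, k3, k4, k5, k6, k7, k8, k9, k10,
          k11, k12, k13, l1, l2, l3, l4, l5, l6, l7, l8, l9, l10,
          l11, l12, l13, hb]

-- ===== VERDICT (by name: the statement is the Claim_ definition above) =====
theorem techniques_compatible_py_spec : Claim_equal_techniques_compatible_py := by
  intro tech1 tech2 _
  unfold Spec_techniques_compatible_py techniques_compatible_py techniques_compatible_py_alt
  by_cases heq : tech1 = tech2
  · simp [heq]
  · have hk := pvKey (pvBase tech1) (pvBase tech2)
    by_cases hu1 : tech1 = "unknown" <;> by_cases hu2 : tech2 = "unknown" <;>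
      by_cases hbb : pvBase tech1 = pvBase tech2 <;>
      simp_all [pvCanonical]
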